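-- pv_equiv track=rewrite | github.com/pypi-data/pypi-mirror-380 | packages/LightGBMModelOptimizer/lightgbmmodeloptimizer-0.0.7-py3-none-any.whl/lightgbmmodeloptimizer/optimizer.py | get_feature_id_mappings
-- ===== SOURCE A (Python) =====
-- def get_feature_id_mappings(results,num_feature)->[dict]:
--     res=[[] for _ in range(num_feature)]
--     for result in results:
--         for i in range(num_feature):
--             res[i].extend(result[i])
--     feature_mappings=[{} for _ in range(num_feature)]
--
--     for i in range(num_feature):
--         feature_mappings[i]={feature_id:True for feature_id in res[i]}
--
--     for i in range(num_feature):
--         cnt = 0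
--         for feat_id in feature_mappings[i].keys():
--             feature_mappings[i][feat_id]=cnt
--             cnt+=1
--     return feature_mappings
-- ===== SOURCE B (Python) =====
-- def get_feature_id_mappings(results, num_feature):
--     # One fused pass: dict length at insertion time gives the sequential index.
--     feature_mappings = [{} for _ in range(num_feature)]
--     for result in results:
--         for i in range(num_feature):
--             m = feature_mappings[i]
--             for fid in result[i]:
--                 if fid not in m:
--                     m[fid] = len(m)
--     return feature_mappings
-- ===== Notes on version B (the rewrite author's own statement) =====
-- stated objective: simpler
-- what changed: Replaces A's three sequential passes (concatenate per-feature lists, build a presence dict, renumber its keys) with a single fused pass that assigns each new id the current dict length at first sight; no intermediate res lists or boolean dicts.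
import Mathlib
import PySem

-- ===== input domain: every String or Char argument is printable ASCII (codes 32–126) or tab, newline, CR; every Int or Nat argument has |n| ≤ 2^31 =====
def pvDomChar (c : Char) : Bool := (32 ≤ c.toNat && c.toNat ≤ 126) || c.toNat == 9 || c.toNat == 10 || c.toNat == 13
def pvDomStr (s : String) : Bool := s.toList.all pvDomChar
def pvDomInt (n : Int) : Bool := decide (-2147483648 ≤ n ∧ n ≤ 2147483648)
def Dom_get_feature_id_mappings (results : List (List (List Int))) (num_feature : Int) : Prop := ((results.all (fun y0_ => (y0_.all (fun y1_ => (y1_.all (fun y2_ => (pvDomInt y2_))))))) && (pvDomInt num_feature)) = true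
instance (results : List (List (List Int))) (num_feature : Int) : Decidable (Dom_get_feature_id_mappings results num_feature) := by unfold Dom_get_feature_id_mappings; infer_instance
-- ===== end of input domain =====

-- B fuses A's three passes (concatenate per-feature id lists, build a presence dict, renumber its keys)
-- into one pass that assigns each new id the current dict length; same return value, proved on Pre_.

-- ===== PORT A =====
-- Python dicts become PySem.Dict Int Int (returned as .items association lists).
-- The value True in A's comprehension {feature_id: True} is ported as 1; every such value is
-- overwritten by the renumbering pass, so it never reaches the output.
-- result[i] raising IndexError is excluded by Pre_; there pyGetD's default is unreachable.
def get_feature_id_mappings (results : List (List (List Int))) (num_feature : Int) : List (List (Int × Int)) :=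
  (((results.foldl
      (fun r result =>
        (PySem.List.pyRange 0 num_feature 1).foldl
          (fun r i => r.set i.toNat (PySem.List.pyGetD r i [] ++ PySem.List.pyGetD result i [])) r)
      ((PySem.List.pyRange 0 num_feature 1).map (fun _ => ([] : List Int)))).map
    (fun xs => xs.foldl (fun d x => d.insert x 1) (PySem.Dict.empty : PySem.Dict Int Int))).map
    (fun d => (d.keys.foldl (fun (p : PySem.Dict Int Int × Int) k => (p.1.insert k p.2, p.2 + 1)) (d, 0)).1)).map
    (fun d => d.items)

-- ===== PORT B =====
def get_feature_id_mappings_alt (results : List (List (List Int))) (num_feature : Int) : List (List (Int × Int)) :=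
  (results.foldl
    (fun fms result =>
      (PySem.List.pyRange 0 num_feature 1).foldl
        (fun fms i =>
          fms.set i.toNat
            ((PySem.List.pyGetD result i []).foldl
              (fun m fid => if m.contains fid then m else m.insert fid (m.size : Int))
              (PySem.List.pyGetD fms i PySem.Dict.empty)))
        fms)
    ((PySem.List.pyRange 0 num_feature 1).map (fun _ => (PySem.Dict.empty : PySem.Dict Int Int)))).map
    (fun d => d.items)

-- ===== PRECONDITION & SPEC =====
-- A raises IndexError (at result[i]) iff some element of results is shorter than num_feature;
-- Pre_ excludes exactly those inputs.
def Pre_get_feature_id_mappings (results : List (List (List Int))) (num_feature : Int) : Prop :=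
  ∀ r ∈ results, num_feature ≤ (r.length : Int)
instance (results : List (List (List Int))) (num_feature : Int) : Decidable (Pre_get_feature_id_mappings results num_feature) := by unfold Pre_get_feature_id_mappings; infer_instance

def pvWitness_get_feature_id_mappings : List (List (List Int)) × Int :=
  ([[[1, 2], [5]], [[2, 3], [5, 7]]], 2)

def Spec_get_feature_id_mappings (results : List (List (List Int))) (num_feature : Int) (out : List (List (Int × Int))) : Prop := out = get_feature_id_mappings_alt results num_feature
instance (results : List (List (List Int))) (num_feature : Int) (out : List (List (Int × Int))) : Decidable (Spec_get_feature_id_mappings results num_feature out) := by unfold Spec_get_feature_id_mappings; infer_instance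

-- ===== CLAIM (what is proved, stated in full; the proofs are below) =====
def Claim_equal_get_feature_id_mappings : Prop := ∀ (results : List (List (List Int))) (num_feature : Int), Dom_get_feature_id_mappings results num_feature → Pre_get_feature_id_mappings results num_feature → Spec_get_feature_id_mappings results num_feature (get_feature_id_mappings results num_feature)

-- ===== LEMMAS AND PROOFS =====

-- (key, running index) enumeration: the canonical value both per-feature columns reduce to.
def pvEnum (c : Int) : List Int → List (Int × Int)
  | [] => []
  | k :: ks => (k, c) :: pvEnum (c + 1) ks

theorem pvEnum_append_singleton (c : Int) (ks : List Int) (x : Int) :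
    pvEnum c (ks ++ [x]) = pvEnum c ks ++ [(x, c + ks.length)] := by
  induction ks generalizing c with
  | nil => simp [pvEnum]
  | cons a t ih => simp [pvEnum, ih]; ring_nf

theorem map_fst_pvEnum (c : Int) (ks : List Int) : (pvEnum c ks).map Prod.fst = ks := by
  induction ks generalizing c with
  | nil => rfl
  | cons a t ih => simp [pvEnum, ih]

theorem length_pvEnum (c : Int) (ks : List Int) : (pvEnum c ks).length = ks.length := by
  induction ks generalizing c with
  | nil => rfl
  | cons a t ih => simp [pvEnum, ih]

-- one index-loop pass (shape shared by both ports) is zipWith on the positions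
theorem pvStep_aux {σ : Type} (g : σ → List Int → σ) (dflt : σ) (nf : Int)
    (result : List (List Int)) (hres : nf.toNat ≤ result.length) :
    ∀ (fuel : Nat) (m : Int) (st : List σ), 0 ≤ m → (nf - m).toNat = fuel → st.length = nf.toNat →
    (PySem.List.pyRange m nf 1).foldl
      (fun st i => st.set i.toNat (g (PySem.List.pyGetD st i dflt) (PySem.List.pyGetD result i []))) st
    = st.take m.toNat ++ List.zipWith g (st.drop m.toNat) (result.drop m.toNat) := by
  intro fuel
  induction fuel with
  | zero =>
    intro m st hm hf hst
    rw [PySem.List.pyRange_one_eq_nil (by omega)]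
    have h1 : st.length ≤ m.toNat := by omega
    simp [List.take_of_length_le h1, List.drop_eq_nil_of_le h1,
      List.zipWith_nil_left, List.foldl_nil]
  | succ n ih =>
    intro m st hm hf hst
    have hmlt : m < nf := by omega
    rw [PySem.List.pyRange_one_cons hmlt]
    simp only [List.foldl_cons]
    have hmm : m.toNat < st.length := by omega
    have hmr : m.toNat < result.length := by omega
    have hg1 : PySem.List.pyGetD st m dflt = st[m.toNat] :=
      PySem.List.pyGetD_eq_getElem st dflt hm (by exact_mod_cast (by omega : m < (st.length : Int)))
    have hg2 : PySem.List.pyGetD result m [] = result[m.toNat] :=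
      PySem.List.pyGetD_eq_getElem result [] hm (by exact_mod_cast (by omega : m < (result.length : Int)))
    set v := g (PySem.List.pyGetD st m dflt) (PySem.List.pyGetD result m []) with hv
    rw [ih (m + 1) (st.set m.toNat v) (by omega) (by omega) (by simp [hst])]
    have hset : st.set m.toNat v = st.take m.toNat ++ v :: st.drop (m.toNat + 1) := by
      rw [List.set_eq_take_append_cons_drop]; simp [hmm]
    have hm1 : (m + 1).toNat = m.toNat + 1 := by omega
    rw [hm1, hset]
    have hlt : (st.take m.toNat).length = m.toNat := by rw [List.length_take]; omega
    rw [List.take_append, List.drop_append]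
    simp only [hlt]
    rw [List.drop_eq_getElem_cons hmm, List.drop_eq_getElem_cons hmr]
    simp [hv, hg1, hg2, hlt, List.take_of_length_le, List.drop_eq_nil_of_le]
    rw [List.drop_eq_getElem_cons hmm, List.drop_eq_getElem_cons hmr, List.zipWith_cons_cons]

theorem pvStep_eq {σ : Type} (g : σ → List Int → σ) (dflt : σ) (nf : Int)
    (st : List σ) (result : List (List Int))
    (hst : st.length = nf.toNat) (hres : nf.toNat ≤ result.length) :
    (PySem.List.pyRange 0 nf 1).foldl
      (fun st i => st.set i.toNat (g (PySem.List.pyGetD st i dflt) (PySem.List.pyGetD result i []))) st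
    = List.zipWith g st result := by
  have := pvStep_aux g dflt nf result hres (nf - 0).toNat 0 st (by omega) rfl hst
  simpa using this

-- A's inner index loop, specialised
theorem pvStepA_eq (nf : Int) (st : List (List Int)) (result : List (List Int))
    (hst : st.length = nf.toNat) (hres : nf.toNat ≤ result.length) :
    (PySem.List.pyRange 0 nf 1).foldl
      (fun r i => r.set i.toNat (PySem.List.pyGetD r i [] ++ PySem.List.pyGetD result i [])) st
    = List.zipWith (fun s xs => s ++ xs) st result :=
  pvStep_eq (fun s xs => s ++ xs) [] nf st result hst hres

-- B's inner index loop, specialised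
theorem pvStepB_eq (nf : Int) (st : List (PySem.Dict Int Int)) (result : List (List Int))
    (hst : st.length = nf.toNat) (hres : nf.toNat ≤ result.length) :
    (PySem.List.pyRange 0 nf 1).foldl
      (fun fms i =>
        fms.set i.toNat
          ((PySem.List.pyGetD result i []).foldl
            (fun m fid => if m.contains fid then m else m.insert fid (m.size : Int))
            (PySem.List.pyGetD fms i PySem.Dict.empty)))
      st
    = List.zipWith
        (fun m xs => xs.foldl (fun m fid => if m.contains fid then m else m.insert fid (m.size : Int)) m)
        st result :=
  pvStep_eq
    (fun m xs => xs.foldl (fun m fid => if m.contains fid then m else m.insert fid (m.size : Int)) m)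
    PySem.Dict.empty nf st result hst hres

theorem pvFoldA (nf : Int) (results : List (List (List Int))) (st : List (List Int))
    (hst : st.length = nf.toNat) (hres : ∀ r ∈ results, nf.toNat ≤ r.length) :
    results.foldl
      (fun r result =>
        (PySem.List.pyRange 0 nf 1).foldl
          (fun r i => r.set i.toNat (PySem.List.pyGetD r i [] ++ PySem.List.pyGetD result i [])) r)
      st
    = results.foldl (fun st r => List.zipWith (fun s xs => s ++ xs) st r) st := by
  induction results generalizing st with
  | nil => rfl
  | cons r rs ih =>
    have hr : nf.toNat ≤ r.length := hres r (by simp)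
    simp only [List.foldl_cons]
    rw [pvStepA_eq nf st r hst hr,
      ih (List.zipWith (fun s xs => s ++ xs) st r)
        (by rw [List.length_zipWith]; omega)
        (fun r' hr' => hres r' (by simp [hr']))]

theorem pvFoldB (nf : Int) (results : List (List (List Int))) (st : List (PySem.Dict Int Int))
    (hst : st.length = nf.toNat) (hres : ∀ r ∈ results, nf.toNat ≤ r.length) :
    results.foldl
      (fun fms result =>
        (PySem.List.pyRange 0 nf 1).foldl
          (fun fms i =>
            fms.set i.toNat
              ((PySem.List.pyGetD result i []).foldl
                (fun m fid => if m.contains fid then m else m.insert fid (m.size : Int))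
                (PySem.List.pyGetD fms i PySem.Dict.empty)))
          fms)
      st
    = results.foldl
        (fun st r =>
          List.zipWith
            (fun m xs => xs.foldl (fun m fid => if m.contains fid then m else m.insert fid (m.size : Int)) m)
            st r)
        st := by
  induction results generalizing st with
  | nil => rfl
  | cons r rs ih =>
    have hr : nf.toNat ≤ r.length := hres r (by simp)
    simp only [List.foldl_cons]
    rw [pvStepB_eq nf st r hst hr,
      ih _ (by rw [List.length_zipWith]; omega) (fun r' hr' => hres r' (by simp [hr']))]

-- folding zipWith over results keeps the length and acts independently on each position
theorem pvFold_zip_length {σ : Type} (g : σ → List Int → σ)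
    (results : List (List (List Int))) (st : List σ)
    (h : ∀ r ∈ results, st.length ≤ r.length) :
    (results.foldl (fun st r => List.zipWith g st r) st).length = st.length := by
  induction results generalizing st with
  | nil => rfl
  | cons r rs ih =>
    have hr : st.length ≤ r.length := h r (by simp)
    simp only [List.foldl_cons]
    rw [ih _ (fun r' hr' => by rw [List.length_zipWith]; exact le_trans (by omega) (h r' (by simp [hr'])))]
    rw [List.length_zipWith]; omega

theorem pvFold_zip_getElem? {σ : Type} (g : σ → List Int → σ)
    (results : List (List (List Int))) (st : List σ)
    (h : ∀ r ∈ results, st.length ≤ r.length) (k : Nat) (hk : k < st.length) :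
    (results.foldl (fun st r => List.zipWith g st r) st)[k]?
      = some (results.foldl (fun s r => g s (r.getD k [])) (st[k])) := by
  induction results generalizing st with
  | nil => simp [List.getElem?_eq_getElem hk]
  | cons r rs ih =>
    have hr : st.length ≤ r.length := h r (by simp)
    have hk2 : k < (List.zipWith g st r).length := by rw [List.length_zipWith]; omega
    simp only [List.foldl_cons]
    rw [ih _ (fun r' hr' => by rw [List.length_zipWith]; exact le_trans (by omega) (h r' (by simp [hr']))) hk2]
    congr 2
    rw [List.getElem_zipWith, List.getD_eq_getElem r [] (by omega)]

theorem pvFoldColB (k : Nat) (rs : List (List (List Int))) (d : PySem.Dict Int Int) :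
    rs.foldl
      (fun m r => (r.getD k []).foldl
        (fun m fid => if m.contains fid then m else m.insert fid (m.size : Int)) m) d
    = ((rs.map (fun r => r.getD k [])).flatten).foldl
        (fun m fid => if m.contains fid then m else m.insert fid (m.size : Int)) d := by
  induction rs generalizing d with
  | nil => rfl
  | cons r t ih =>
    simp only [List.foldl_cons, List.map_cons, List.flatten_cons, List.foldl_append]
    exact ih _

theorem pvFoldAppend (k : Nat) (rs : List (List (List Int))) (init : List Int) :
    rs.foldl (fun s r => s ++ r.getD k []) init
      = init ++ (rs.map (fun r => r.getD k [])).flatten := by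
  induction rs generalizing init with
  | nil => simp
  | cons r t ih => simp [List.append_assoc]

theorem pvMapFstPair (S : List Int) : (S.map (fun k => (k, (1 : Int)))).map Prod.fst = S := by
  induction S with
  | nil => rfl
  | cons a t ih => simp [ih]

theorem pvMapIfEq (c x : Int) (l : List (Int × Int)) (h : ∀ p ∈ l, p.1 ≠ x) :
    l.map (fun p => if p.1 == x then (x, c) else p) = l := by
  induction l with
  | nil => rfl
  | cons p t ih =>
    have hp := h p (by simp)
    simp only [List.map_cons, ih (fun q hq => h q (List.mem_cons_of_mem _ hq))]
    simp [hp]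

theorem pvNodupAppendSingleton (S : List Int) (x : Int) (hS : S.Nodup) (hx : x ∉ S) :
    (S ++ [x]).Nodup := by
  rw [List.nodup_append]
  refine ⟨hS, List.nodup_singleton x, ?_⟩
  intro a ha b hb hab
  subst hab
  rw [List.mem_singleton] at hb
  subst hb
  exact hx ha

-- A's presence-dict build: items are (key, 1) over first occurrences
theorem pvDict1_items (xs : List Int) (S : List Int) (d : PySem.Dict Int Int)
    (hS : S.Nodup) (hd : d.items = S.map (fun k => (k, (1 : Int)))) :
    (xs.foldl (fun d x => d.insert x 1) d).items
      = (PySem.Set.update S xs).map (fun k => (k, (1 : Int))) := by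
  induction xs generalizing S d with
  | nil => rw [PySem.Set.update_nil]; exact hd
  | cons x xs ih =>
    have hkeys : d.keys = S := by
      rw [show d.keys = d.items.map Prod.fst from rfl, hd, pvMapFstPair]
    simp only [List.foldl_cons]
    by_cases hx : x ∈ S
    · have hc : d.contains x = true := by
        rw [PySem.Dict.contains_eq_decide_mem_keys, hkeys]; simp [hx]
      have hitems : (d.insert x 1).items = S.map (fun k => (k, (1 : Int))) := by
        rw [PySem.Dict.items_insert_of_contains d 1 hc, hd, List.map_map]
        apply List.map_congr_left
        intro j hj
        by_cases hjx : j = x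
        · subst hjx; simp
        · simp [Function.comp, hjx]
      rw [PySem.Set.update_cons, PySem.Set.add_of_mem hx]
      exact ih S (d.insert x 1) hS hitems
    · have hc : d.contains x = false := by
        rw [PySem.Dict.contains_eq_decide_mem_keys, hkeys]; simp [hx]
      have hitems : (d.insert x 1).items = (S ++ [x]).map (fun k => (k, (1 : Int))) := by
        rw [PySem.Dict.items_insert_of_not_contains d 1 hc, hd]; simp
      rw [PySem.Set.update_cons, PySem.Set.add_of_not_mem hx]
      exact ih (S ++ [x]) (d.insert x 1) (pvNodupAppendSingleton S x hS hx) hitems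

-- A's renumbering pass over the keys of a presence dict
theorem pvRenum_items (L : List Int) (pre : List (Int × Int)) (c : Int)
    (hnd : ((pre ++ L.map (fun k => (k, (1 : Int)))).map Prod.fst).Nodup) :
    ((L.foldl (fun (p : PySem.Dict Int Int × Int) k => (p.1.insert k p.2, p.2 + 1))
        (PySem.Dict.mk (pre ++ L.map (fun k => (k, (1 : Int)))), c)).1).items
      = pre ++ pvEnum c L := by
  induction L generalizing pre c with
  | nil => simp [pvEnum]
  | cons x L ih =>
    have hnd' : (pre.map Prod.fst ++ x :: L).Nodup := by
      simpa [Function.comp_def] using hnd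
    rw [List.nodup_append] at hnd'
    have hx_pre : ∀ p ∈ pre, p.1 ≠ x := by
      intro p hp he
      exact hnd'.2.2 p.1 (List.mem_map_of_mem hp) x (by simp) he
    have hx_L : x ∉ L := (List.nodup_cons.mp hnd'.2.1).1
    have hc : (PySem.Dict.mk (pre ++ (x :: L).map (fun k => (k, (1 : Int))))).contains x = true := by
      rw [PySem.Dict.contains_eq_decide_mem_keys]
      simp only [PySem.Dict.keys]
      simp
    have hLne : ∀ p ∈ L.map (fun k => (k, (1 : Int))), p.1 ≠ x := by
      intro p hp
      simp only [List.mem_map] at hp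
      obtain ⟨j, hj, rfl⟩ := hp
      exact fun he => hx_L (he ▸ hj)
    have hitems : ((PySem.Dict.mk (pre ++ (x :: L).map (fun k => (k, (1 : Int))))).insert x c).items
        = (pre ++ [(x, c)]) ++ L.map (fun k => (k, (1 : Int))) := by
      rw [PySem.Dict.items_insert_of_contains _ c hc]
      have hred : (PySem.Dict.mk (pre ++ (x :: L).map (fun k => (k, (1 : Int))))).items
          = pre ++ (x, (1 : Int)) :: L.map (fun k => (k, (1 : Int))) := rfl
      rw [hred, List.map_append, List.map_cons, pvMapIfEq c x pre hx_pre,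
        pvMapIfEq c x (L.map (fun k => (k, (1 : Int)))) hLne]
      simp
    have hmk : (PySem.Dict.mk (pre ++ (x :: L).map (fun k => (k, (1 : Int))))).insert x c
        = PySem.Dict.mk ((pre ++ [(x, c)]) ++ L.map (fun k => (k, (1 : Int)))) := by
      exact PySem.Dict.ext (hitems.trans rfl)
    simp only [List.foldl_cons]
    rw [hmk, ih (pre ++ [(x, c)]) (c + 1)
      (by simpa [Function.comp_def, List.nodup_append] using hnd')]
    simp [pvEnum]

-- B's fused insert-at-current-length loop
theorem pvB_items (xs : List Int) (S : List Int) (d : PySem.Dict Int Int)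
    (hS : S.Nodup) (hd : d.items = pvEnum 0 S) :
    (xs.foldl (fun m fid => if m.contains fid then m else m.insert fid (m.size : Int)) d).items
      = pvEnum 0 (PySem.Set.update S xs) := by
  induction xs generalizing S d with
  | nil => rw [PySem.Set.update_nil]; exact hd
  | cons x xs ih =>
    have hkeys : d.keys = S := by
      rw [show d.keys = d.items.map Prod.fst from rfl, hd, map_fst_pvEnum]
    simp only [List.foldl_cons]
    by_cases hx : x ∈ S
    · have hc : d.contains x = true := by
        rw [PySem.Dict.contains_eq_decide_mem_keys, hkeys]; simp [hx]
      rw [PySem.Set.update_cons, PySem.Set.add_of_mem hx]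
      simp only [hc, if_true]
      exact ih S d hS hd
    · have hc : d.contains x = false := by
        rw [PySem.Dict.contains_eq_decide_mem_keys, hkeys]; simp [hx]
      rw [PySem.Set.update_cons, PySem.Set.add_of_not_mem hx]
      simp only [hc, Bool.false_eq_true, if_false]
      refine ih (S ++ [x]) (d.insert x (d.size : Int)) (pvNodupAppendSingleton S x hS hx) ?_
      rw [PySem.Dict.items_insert_of_not_contains d _ hc, hd, pvEnum_append_singleton]
      simp [PySem.Dict.size, hd, length_pvEnum]

-- per-feature column: A's three passes and B's fused pass agree
theorem pvCol_eq (results : List (List (List Int))) (k : Nat) :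
    (((results.foldl (fun (s : List Int) r => s ++ r.getD k []) []).foldl
        (fun d x => d.insert x 1) (PySem.Dict.empty : PySem.Dict Int Int)).keys.foldl
      (fun (p : PySem.Dict Int Int × Int) j => (p.1.insert j p.2, p.2 + 1))
      (((results.foldl (fun (s : List Int) r => s ++ r.getD k []) []).foldl
        (fun d x => d.insert x 1) (PySem.Dict.empty : PySem.Dict Int Int)), 0)).1.items
    = (results.foldl
        (fun (m : PySem.Dict Int Int) r =>
          (r.getD k []).foldl (fun m fid => if m.contains fid then m else m.insert fid (m.size : Int)) m)
        PySem.Dict.empty).items := by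
  have hA0 := pvFoldAppend k results []
  simp only [List.nil_append] at hA0
  rw [hA0]
  rw [pvFoldColB k results PySem.Dict.empty]
  generalize (results.map (fun r => r.getD k [])).flatten = xs
  have hd1 : ((xs.foldl (fun d x => d.insert x 1) (PySem.Dict.empty : PySem.Dict Int Int))).items
      = (PySem.Set.ofList xs).map (fun j => (j, (1 : Int))) := by
    have h := pvDict1_items xs [] PySem.Dict.empty (by simp) (by rfl)
    rwa [PySem.Set.update_nil_left] at h
  have hkeys : (xs.foldl (fun d x => d.insert x 1) (PySem.Dict.empty : PySem.Dict Int Int)).keys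
      = PySem.Set.ofList xs := by
    rw [show (xs.foldl (fun d x => d.insert x 1) (PySem.Dict.empty : PySem.Dict Int Int)).keys
        = (xs.foldl (fun d x => d.insert x 1) (PySem.Dict.empty : PySem.Dict Int Int)).items.map Prod.fst from rfl,
      hd1, pvMapFstPair]
  have hmk : (xs.foldl (fun d x => d.insert x 1) (PySem.Dict.empty : PySem.Dict Int Int))
      = PySem.Dict.mk (([] : List (Int × Int)) ++ (PySem.Set.ofList xs).map (fun j => (j, (1 : Int)))) := by
    exact PySem.Dict.ext (hd1.trans (List.nil_append _).symm)
  rw [hkeys, hmk]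
  rw [pvRenum_items (PySem.Set.ofList xs) [] 0
    (by rw [List.nil_append, pvMapFstPair]; apply PySem.Set.nodup_ofList)]
  have hB := pvB_items xs [] PySem.Dict.empty (by simp) (by rfl)
  rw [hB, PySem.Set.update_nil_left]
  rfl

-- ===== VERDICT (by name: the statement is the Claim_ definition above) =====
theorem get_feature_id_mappings_spec : Claim_equal_get_feature_id_mappings := by
  intro results nf hdom hpre
  unfold Spec_get_feature_id_mappings get_feature_id_mappings get_feature_id_mappings_alt
  have hres : ∀ r ∈ results, nf.toNat ≤ r.length := by
    intro r hr; have := hpre r hr; omega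
  have hlen0 : ((PySem.List.pyRange 0 nf 1).map (fun _ => ([] : List Int))).length = nf.toNat := by
    simp [PySem.List.length_pyRange_one]
  have hlen0' : ((PySem.List.pyRange 0 nf 1).map (fun _ => (PySem.Dict.empty : PySem.Dict Int Int))).length = nf.toNat := by
    simp [PySem.List.length_pyRange_one]
  rw [pvFoldA nf results _ hlen0 hres, pvFoldB nf results _ hlen0' hres]
  apply List.ext_getElem?
  intro k
  simp only [List.map_map, List.getElem?_map]
  by_cases hk : k < nf.toNat
  · rw [pvFold_zip_getElem? _ results _ (fun r hr => by rw [hlen0]; exact hres r hr) k (by omega),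
        pvFold_zip_getElem? _ results _ (fun r hr => by rw [hlen0']; exact hres r hr) k (by omega)]
    simp only [Option.map_some, List.getElem_map, Function.comp]
    exact congrArg some (pvCol_eq results k)
  · have h1 := List.getElem?_eq_none (l := results.foldl (fun st r => List.zipWith (fun s xs => s ++ xs) st r) ((PySem.List.pyRange 0 nf 1).map (fun _ => ([] : List Int)))) (i := k)
      (by rw [pvFold_zip_length _ results _ (fun r hr => by rw [hlen0]; exact hres r hr), hlen0]; omega)
    have h2 := List.getElem?_eq_none
      (l := results.foldl (fun st r => List.zipWith (fun m xs => xs.foldl (fun m fid => if m.contains fid then m else m.insert fid (m.size : Int)) m) st r) ((PySem.List.pyRange 0 nf 1).map (fun _ => (PySem.Dict.empty : PySem.Dict Int Int)))) (i := k)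
      (by rw [pvFold_zip_length _ results _ (fun r hr => by rw [hlen0']; exact hres r hr), hlen0']; omega)
    rw [h1, h2]; rfl
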